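/- GENERATED by farm/mkstatement.py from design/units.tsv (unit `decode_residue.7a`) and the assertions of Vorbis/Spec/DecodeResidue7.lean — do not edit.
   THE STATEMENT of the proof unit `decode_residue.7a`: segment 7a of `decode_residue` (18 instructions; entries 0x10f314;
   exits 0x10f36f; ranges 0x10f314-0x10f368 + 0x10f4a8-0x10f4b4)
   takes each of its entry assertions to one of its exit assertions (`Vorbis.Spec.DecodeResidue.Seg7a`), given the contracts of its callees.
   What the names mean: Vorbis/Spec/Basic.lean (the shared hypotheses), Vorbis/Spec/DecodeResidue7.lean (the assertions). The theorem to prove: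
   `theorem decode_residue_7a_ok : Vorbis.Spec.decode_residue_7a.Statement`. -/
import Vorbis.Spec.DecodeResidue7
import Vorbis.Spec.Reader
namespace Vorbis.Spec.decode_residue_7a
open X86 X86.User Asan

/-- The statement of unit `decode_residue.7a`. -/
def Statement : Prop :=
  ∀ (Lay : Layout) (_hLay : Lay.hi = 0x1000000) (μ : Microarch) (_hμ : UserX.MicroOK μ) (u₀ : State)
    (_hcode : HasCodeNat Lay u₀ Vorbis.L.decode_residue.entry Vorbis.Code.code_decode_residue.nat Vorbis.L.decode_residue.size)
    (_h_asan_load8_noabort : Asan.SmallCheck Lay μ Vorbis.WayInv (Vorbis.CodeOK u₀) [.rax, .rcx, .rdx] 8 Vorbis.L.__asan_load8_noabort.entry)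
    (_h_asan_load1_noabort : Asan.SmallCheck Lay μ Vorbis.WayInv (Vorbis.CodeOK u₀) [.rax, .rdx] 1 Vorbis.L.__asan_load1_noabort.entry)
    (_h_asan_load4_noabort : Asan.SmallCheck Lay μ Vorbis.WayInv (Vorbis.CodeOK u₀) [.rax, .rcx, .rdx] 4 Vorbis.L.__asan_load4_noabort.entry)
    (_h_prep_huffman : ∀ (others : List Obj) (frames : List (Nat × FrameLayout)) (Blk : Block → Prop) (len : Nat), Calls Lay μ Vorbis.WayInv (Vorbis.conv u₀) Vorbis.L.prep_huffman.entry (Vorbis.Spec.prep_huffman.spec others frames Blk len)),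
    Vorbis.Spec.DecodeResidue.Seg7a Lay μ u₀

end Vorbis.Spec.decode_residue_7a
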